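-- pv_equiv track=rewrite | github.com/ahdavies6/NLP_QA | text_analyzer.py | get_prep_phrases
-- ===== SOURCE A (Python) =====
-- def restring(sentence):
--     restring = []
--     for word in sentence:
--         restring.append(word[0])
--
--     return ' '.join(restring)
--
-- def get_prep_phrases(tagged_sentence):
--     prep_tags = ['GP', 'NN', 'OR', 'JJ']
--     x_phrases = []
--     x_words = []
--     for word in tagged_sentence:
--         if len(x_words) == 0:
--             if word[1] == 'IN':
--                 x_words.append(word)
--         elif word[1] in prep_tags:
--             x_words.append(word)
--         else:
--             if len(x_words) > 1:
--                 x_phrases.append(restring(x_words))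
--             x_words.clear()
--     if len(x_words) > 1:
--         x_phrases.append(restring(x_words))
--         x_words.clear()
--
--     return x_phrases
-- ===== SOURCE B (Python) =====
-- def get_prep_phrases(tagged_sentence):
--     prep_tags = ('GP', 'NN', 'OR', 'JJ')
--     phrases = []
--     rest = list(tagged_sentence)
--     while rest:
--         head = rest[0]
--         tl = rest[1:]
--         if head[1] == 'IN':
--             run = []
--             for w in tl:            # take the maximal prefix of prep-tagged words
--                 if w[1] in prep_tags:
--                     run.append(w)
--                 else:
--                     break
--             if len(run) >= 1:
--                 phrases.append(' '.join(w[0] for w in [head] + run))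
--             rest = tl[len(run) + 1:]   # skip the terminating word too
--         else:
--             rest = tl
--     return phrases
-- ===== Notes on version B (the rewrite author's own statement) =====
-- stated objective: alternative
-- what changed: Replaces A's incremental flush state machine (buffer x_words grown word by word, flushed on a non-prep tag and again after the loop) by a lookahead decomposition: on an 'IN' word, grab the maximal run of prep-tagged words in one inner scan, emit the joined slice if nonempty, and skip past the terminating word.
import Mathlib
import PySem

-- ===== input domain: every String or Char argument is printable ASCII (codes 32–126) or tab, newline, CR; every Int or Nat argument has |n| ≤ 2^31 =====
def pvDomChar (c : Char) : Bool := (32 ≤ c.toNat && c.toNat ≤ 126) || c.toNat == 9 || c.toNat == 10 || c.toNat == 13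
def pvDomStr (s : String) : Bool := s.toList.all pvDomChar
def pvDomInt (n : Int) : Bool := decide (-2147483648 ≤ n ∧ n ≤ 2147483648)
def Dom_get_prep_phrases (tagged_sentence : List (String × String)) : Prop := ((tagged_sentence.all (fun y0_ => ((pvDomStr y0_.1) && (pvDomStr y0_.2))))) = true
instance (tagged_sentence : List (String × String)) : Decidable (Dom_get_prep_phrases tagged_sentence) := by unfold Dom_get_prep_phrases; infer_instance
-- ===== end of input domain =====

-- B replaces A's incremental flush state machine with a lookahead decomposition
-- (grab the maximal prep-tagged run after each 'IN' in one inner scan); same cost, alternative structure.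


-- ===== PORT A =====
def restringA (sentence : List (String × String)) : String :=
  PySem.Str.join " " (sentence.foldl (fun acc word => acc ++ [word.1]) [])

def prepTagsA : List String := ["GP", "NN", "OR", "JJ"]

def stepA (st : List String × List (String × String)) (word : String × String) :
    List String × List (String × String) :=
  if st.2.length == 0 then
    if word.2 == "IN" then (st.1, st.2 ++ [word]) else st
  else if prepTagsA.contains word.2 then
    (st.1, st.2 ++ [word])
  else
    (st.1 ++ (if st.2.length > 1 then [restringA st.2] else []), [])

def get_prep_phrases (tagged_sentence : List (String × String)) : List String :=
  let st := tagged_sentence.foldl stepA ([], [])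
  st.1 ++ (if st.2.length > 1 then [restringA st.2] else [])

-- ===== PORT B =====
def prepTagsB : List String := ["GP", "NN", "OR", "JJ"]

def altGo (rest : List (String × String)) : List String :=
  match rest with
  | [] => []
  | head :: tl =>
    if head.2 == "IN" then
      -- the for/break loop in Source B computes exactly the maximal prep-tagged prefix
      let run := tl.takeWhile (fun w => prepTagsB.contains w.2)
      (if run.length ≥ 1 then [PySem.Str.join " " ((head :: run).map Prod.fst)] else [])
        ++ altGo (tl.drop (run.length + 1))
    else
      altGo tl
termination_by rest.length
decreasing_by
  · simp only [List.length_drop, List.length_cons]; omega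
  · simp only [List.length_cons]; omega

def get_prep_phrases_alt (tagged_sentence : List (String × String)) : List String :=
  altGo tagged_sentence

-- ===== PRECONDITION & SPEC =====
def Spec_get_prep_phrases (tagged_sentence : List (String × String)) (out : List String) : Prop := out = get_prep_phrases_alt tagged_sentence
instance (tagged_sentence : List (String × String)) (out : List String) : Decidable (Spec_get_prep_phrases tagged_sentence out) := by unfold Spec_get_prep_phrases; infer_instance

-- ===== CLAIM (what is proved, stated in full; the proofs are below) =====
def Claim_equal_get_prep_phrases : Prop := ∀ (tagged_sentence : List (String × String)), Dom_get_prep_phrases tagged_sentence → Spec_get_prep_phrases tagged_sentence (get_prep_phrases tagged_sentence)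

-- ===== LEMMAS AND PROOFS =====

def finishA (st : List String × List (String × String)) : List String :=
  st.1 ++ (if st.2.length > 1 then [restringA st.2] else [])

theorem restringA_eq_join (s : List (String × String)) :
    restringA s = PySem.Str.join " " (s.map Prod.fst) := by
  unfold restringA
  congr 1
  induction s using List.reverseRecOn with
  | nil => rfl
  | append_singleton xs x ih => simp [ih]

-- The two-part invariant, by strong induction on length:
-- E: from an empty buffer, the rest of A's fold produces altGo.
-- N: from a buffer h :: run (all of run prep-tagged), the fold flushes exactly B's phrase.
theorem main_invariant (n : Nat) :
    (∀ (l : List (String × String)) (p : List String), l.length ≤ n →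
      finishA (l.foldl stepA (p, [])) = p ++ altGo l) ∧
    (∀ (tl : List (String × String)) (p : List String) (h : String × String)
        (run : List (String × String)), tl.length ≤ n →
      (∀ w ∈ run, prepTagsA.contains w.2) →
      finishA (tl.foldl stepA (p, h :: run)) =
        p ++ (if (run ++ tl.takeWhile (fun w => prepTagsB.contains w.2)).length ≥ 1 then
                [PySem.Str.join " " ((h :: (run ++ tl.takeWhile (fun w => prepTagsB.contains w.2))).map Prod.fst)]
              else [])
          ++ altGo (tl.drop ((tl.takeWhile (fun w => prepTagsB.contains w.2)).length + 1))) := by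
  induction n with
  | zero =>
    constructor
    · intro l p hl
      match l, hl with
      | [], _ => simp [finishA, altGo]
    · intro tl p h run hl hrun
      match tl, hl with
      | [], _ =>
        simp only [List.foldl_nil, List.takeWhile_nil, List.append_nil, List.drop, altGo]
        simp only [finishA]
        rcases run with _ | ⟨r, rs⟩ <;> simp [restringA_eq_join]
  | succ n ih =>
    obtain ⟨ihE, ihN⟩ := ih
    constructor
    · -- E
      intro l p hl
      match l with
      | [] => simp [finishA, altGo]
      | w :: l' =>
        have hlen' : l'.length ≤ n := by simpa using Nat.lt_succ_iff.mp (by simpa using hl)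
        by_cases hIN : w.2 = "IN"
        · have hstep : stepA (p, []) w = (p, [w]) := by simp [stepA, hIN]
          rw [List.foldl_cons, hstep]
          have := ihN l' p w [] hlen' (by simp)
          simp only [List.nil_append] at this
          rw [this]
          conv_rhs => rw [altGo]
          simp [hIN]
        · have hstep : stepA (p, []) w = (p, []) := by simp [stepA, hIN]
          rw [List.foldl_cons, hstep, ihE l' p hlen']
          conv_rhs => rw [altGo]
          simp [hIN]
    · -- N
      intro tl p h run hl hrun
      match tl with
      | [] =>
        simp only [List.foldl_nil, List.takeWhile_nil, List.append_nil, List.drop, altGo]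
        simp only [finishA]
        rcases run with _ | ⟨r, rs⟩ <;> simp [restringA_eq_join]
      | w :: tl' =>
        have hlen' : tl'.length ≤ n := by simpa using Nat.lt_succ_iff.mp (by simpa using hl)
        by_cases hprep : w.2 ∈ prepTagsA
        · have hstep : stepA (p, h :: run) w = (p, h :: (run ++ [w])) := by
            simp [stepA, hprep]
          rw [List.foldl_cons, hstep]
          have := ihN tl' p h (run ++ [w]) hlen'
            (by intro x hx
                rcases List.mem_append.mp hx with h1 | h1
                · exact hrun x h1
                · rw [List.mem_singleton.mp h1]; simpa using hprep)
          rw [this]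
          have hmB : w.2 ∈ prepTagsB := hprep
          have htw : (w :: tl').takeWhile (fun w => prepTagsB.contains w.2)
              = w :: tl'.takeWhile (fun w => prepTagsB.contains w.2) := by
            simp [hmB]
          rw [htw]
          simp only [List.append_assoc, List.singleton_append, List.length_cons,
            List.drop_succ_cons]
        · have hstep : stepA (p, h :: run) w =
              (p ++ (if (h :: run).length > 1 then [restringA (h :: run)] else []), []) := by
            simp [stepA, hprep]
          rw [List.foldl_cons, hstep, ihE tl' _ hlen']
          have hmB : w.2 ∉ prepTagsB := hprep
          have htw : (w :: tl').takeWhile (fun w => prepTagsB.contains w.2) = [] := by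
            simp [hmB]
          rw [htw]
          simp only [List.append_nil, List.length_nil, Nat.zero_add,
            List.drop_succ_cons, List.drop_zero, List.append_assoc]
          congr 1
          rcases run with _ | ⟨r, rs⟩ <;> simp [restringA_eq_join]

-- ===== VERDICT (by name: the statement is the Claim_ definition above) =====
theorem get_prep_phrases_spec : Claim_equal_get_prep_phrases := by
  intro ts _
  unfold Spec_get_prep_phrases get_prep_phrases get_prep_phrases_alt
  have := (main_invariant ts.length).1 ts [] le_rfl
  simpa [finishA] using this
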